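-- pv_equiv track=rewrite | github.com/jgraham/hejbot | hejbot/plugins/reviewers.py | expand_groups
-- ===== SOURCE A (Python) =====
-- def expand_groups(config, items, seen=None):
--     groups = config.get("groups", {})
--     rv = set()
--     if seen is None:
--         seen = set()
--
--     for item in items:
--         if item.startswith('@'):
--             rv.add(item)
--         elif item in groups:
--             if item in seen:
--                 continue
--             seen.add(item)
--             rv |= expand_groups(config, groups[item], seen)
--
--     return rv
-- ===== SOURCE B (Python) =====
-- def expand_groups(config, items, seen=None):
--     groups = config.get("groups", {})
--     if seen is None:
--         seen = set()
--     rv = set()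
--     stack = list(reversed(items))
--     while stack:
--         item = stack.pop()
--         if item.startswith('@'):
--             rv.add(item)
--         elif item in groups and item not in seen:
--             seen.add(item)
--             stack.extend(reversed(groups[item]))
--     return rv
-- ===== Notes on version B (the rewrite author's own statement) =====
-- stated objective: alternative
-- what changed: Replaces the recursive set-union expansion with an explicit iterative worklist (stack) DFS that accumulates into a single rv set, mutating the passed-in seen set identically.
import Mathlib
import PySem

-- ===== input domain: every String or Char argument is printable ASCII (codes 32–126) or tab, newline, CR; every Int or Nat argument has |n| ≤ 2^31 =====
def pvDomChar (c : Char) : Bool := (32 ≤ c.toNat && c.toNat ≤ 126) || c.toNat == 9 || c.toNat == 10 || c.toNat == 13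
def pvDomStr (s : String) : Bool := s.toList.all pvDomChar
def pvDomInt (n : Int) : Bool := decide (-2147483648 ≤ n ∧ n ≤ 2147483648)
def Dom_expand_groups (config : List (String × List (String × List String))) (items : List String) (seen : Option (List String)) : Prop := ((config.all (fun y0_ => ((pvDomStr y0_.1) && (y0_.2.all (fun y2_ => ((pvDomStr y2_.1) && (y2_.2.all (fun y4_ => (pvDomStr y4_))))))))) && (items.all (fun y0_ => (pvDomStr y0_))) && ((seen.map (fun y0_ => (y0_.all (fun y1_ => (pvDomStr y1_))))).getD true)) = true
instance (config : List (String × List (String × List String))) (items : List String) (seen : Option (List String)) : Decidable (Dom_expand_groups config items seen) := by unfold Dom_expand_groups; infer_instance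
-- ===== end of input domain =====

-- B replaces A's recursive expansion by an iterative worklist (stack) DFS accumulating into one set
-- (alternative decomposition; same asymptotic cost). Equivalence is about the RETURN value; Python A
-- and B both mutate the passed-in `seen` set in place, and do so identically.

-- Termination measure shared by both ports: number of distinct group keys not yet in `seen`.
def pvMu (groups : PySem.Dict String (List String)) (seen : List String) : Nat :=
  ((groups.items.map Prod.fst).toFinset.filter (fun k => k ∉ seen)).card

-- `seen` strictly shrinks the measure when a fresh group key is added (and possibly more afterwards).
theorem pvMu_lt (groups : PySem.Dict String (List String)) (seen t : List String) (item : String)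
    (hg : groups.contains item = true) (hs : item ∉ seen)
    (hsub : ∀ x ∈ seen, x ∈ t) (hit : item ∈ t) :
    pvMu groups t < pvMu groups seen := by
  apply Finset.card_lt_card
  constructor
  · intro x hx
    simp only [Finset.mem_filter] at hx ⊢
    exact ⟨hx.1, fun hxs => hx.2 (hsub x hxs)⟩
  · intro hcon
    have hk : item ∈ (groups.items.map Prod.fst).toFinset := by
      simp only [PySem.Dict.contains, List.any_eq_true] at hg
      obtain ⟨p, hp, hpe⟩ := hg
      simp only [List.mem_toFinset, List.mem_map]
      exact ⟨p, hp, by simpa using hpe⟩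
    have : item ∈ (groups.items.map Prod.fst).toFinset.filter (fun k => k ∉ t) :=
      hcon (by simp only [Finset.mem_filter]; exact ⟨hk, hs⟩)
    simp only [Finset.mem_filter] at this
    exact this.2 hit

-- ===== PORT A =====
-- Literal port of A's for-loop over `items`, threading (rv, seen) and recursing on groups[item]
-- with a fresh rv then `rv |= …`.  The subtype carries the two invariants (seen only grows; rv
-- stays duplicate-free) needed for termination and the proofs; the VALUE is exactly A's (rv, seen).
def egA (groups : PySem.Dict String (List String)) (items seen rv : List String) :
    {p : List String × List String // (∀ x ∈ seen, x ∈ p.2) ∧ (rv.Nodup → p.1.Nodup)} :=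
  match items with
  | [] => ⟨(rv, seen), fun _ h => h, fun h => h⟩
  | item :: rest =>
    if PySem.Str.startswith item "@" then
      let r := egA groups rest seen (PySem.Set.add rv item)
      ⟨r.val, r.property.1, fun h => r.property.2 (PySem.Set.nodup_add _ _ h)⟩
    else if hg : groups.contains item then
      if hs : PySem.Set.contains seen item then
        egA groups rest seen rv
      else
        let p := egA groups (groups.getD item []) (PySem.Set.add seen item) PySem.Set.empty
        let r := egA groups rest p.val.2 (PySem.Set.union rv p.val.1)
        ⟨r.val,
         fun x hx => r.property.1 x (p.property.1 x (by
           exact (PySem.Set.mem_add seen item x).mpr (Or.inl hx))),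
         fun h => r.property.2 (PySem.Set.nodup_update _ _ h)⟩
    else egA groups rest seen rv
  termination_by (pvMu groups seen, items.length)
  decreasing_by
  · exact Prod.Lex.right _ (by simp only [List.length_cons]; omega)
  · exact Prod.Lex.right _ (by simp only [List.length_cons]; omega)
  · refine Prod.Lex.left _ _ ?_
    refine pvMu_lt groups seen _ item hg ?_ (fun x hx => (PySem.Set.mem_add _ _ _).mpr (Or.inl hx))
      ((PySem.Set.mem_add _ _ _).mpr (Or.inr rfl))
    exact fun h => hs ((PySem.Set.contains_iff _ _).mpr h)
  · refine Prod.Lex.left _ _ ?_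
    refine pvMu_lt groups seen _ item hg
      (fun h => hs ((PySem.Set.contains_iff _ _).mpr h))
      (fun x hx => p.property.1 x ((PySem.Set.mem_add _ _ _).mpr (Or.inl hx)))
      (p.property.1 item ((PySem.Set.mem_add _ _ _).mpr (Or.inr rfl)))
  · exact Prod.Lex.right _ (by simp only [List.length_cons]; omega)

def expand_groups (config : List (String × List (String × List String))) (items : List String) (seen : Option (List String)) : List String :=
  let groups : PySem.Dict String (List String) :=
    PySem.Dict.mk ((PySem.Dict.mk config).getD "groups" [])
  let seen0 : List String :=
    match seen with
    | none => PySem.Set.empty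
    | some s => s
  (egA groups items seen0 PySem.Set.empty).val.1

-- ===== PORT B =====
-- Literal port of Source B's worklist loop.  Source B keeps the stack with its TOP at the END of a Python
-- list (items reversed, pop(), extend(reversed(groups[item]))); here the same stack is written
-- top-first, so `pop` is head, the initial stack is `items` and extend-reversed is list append.
def egB (groups : PySem.Dict String (List String)) (stack seen rv : List String) : List String :=
  match stack with
  | [] => rv
  | item :: stack' =>
    if PySem.Str.startswith item "@" then
      egB groups stack' seen (PySem.Set.add rv item)
    else if h : (groups.contains item && !(PySem.Set.contains seen item)) = true then
      egB groups (groups.getD item [] ++ stack') (PySem.Set.add seen item) rv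
    else egB groups stack' seen rv
  termination_by (pvMu groups seen, stack.length)
  decreasing_by
  · exact Prod.Lex.right _ (by simp only [List.length_cons]; omega)
  · refine Prod.Lex.left _ _ ?_
    simp only [Bool.and_eq_true, Bool.not_eq_true'] at h
    have hs' : item ∉ seen := by
      intro hm
      have hc := (PySem.Set.contains_iff seen item).mpr hm
      rw [h.2] at hc
      exact absurd hc (by simp)
    exact pvMu_lt groups seen _ item h.1 hs' (fun x hx => (PySem.Set.mem_add _ _ _).mpr (Or.inl hx))
      ((PySem.Set.mem_add _ _ _).mpr (Or.inr rfl))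
  · exact Prod.Lex.right _ (by simp only [List.length_cons]; omega)

def expand_groups_alt (config : List (String × List (String × List String))) (items : List String) (seen : Option (List String)) : List String :=
  let groups : PySem.Dict String (List String) :=
    PySem.Dict.mk ((PySem.Dict.mk config).getD "groups" [])
  let seen0 : List String :=
    match seen with
    | none => PySem.Set.empty
    | some s => s
  egB groups items seen0 PySem.Set.empty

-- ===== PRECONDITION & SPEC =====
def Spec_expand_groups (config : List (String × List (String × List String))) (items : List String) (seen : Option (List String)) (out : List String) : Prop := out = expand_groups_alt config items seen
instance (config : List (String × List (String × List String))) (items : List String) (seen : Option (List String)) (out : List String) : Decidable (Spec_expand_groups config items seen out) := by unfold Spec_expand_groups; infer_instance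

-- ===== CLAIM (what is proved, stated in full; the proofs are below) =====
def Claim_equal_expand_groups : Prop := ∀ (config : List (String × List (String × List String))) (items : List String) (seen : Option (List String)), Dom_expand_groups config items seen → Spec_expand_groups config items seen (expand_groups config items seen)

-- ===== LEMMAS AND PROOFS =====

theorem set_update_nil (s : List String) : PySem.Set.update s [] = s := rfl

theorem set_update_add (s t : List String) (x : String) :
    PySem.Set.update s (PySem.Set.add t x) = PySem.Set.add (PySem.Set.update s t) x := by
  by_cases hx : x ∈ t
  · rw [PySem.Set.add_of_mem hx, PySem.Set.add_of_mem ((PySem.Set.mem_update _ _ _).mpr (Or.inr hx))]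
  · rw [PySem.Set.add_of_not_mem hx, PySem.Set.update_append]
    rfl

theorem set_update_assoc (l : List String) : ∀ (s t : List String),
    PySem.Set.update s (PySem.Set.update t l) = PySem.Set.update (PySem.Set.update s t) l := by
  induction l with
  | nil => intro s t; rfl
  | cons x l ih =>
    intro s t
    rw [PySem.Set.update_cons, ih s (PySem.Set.add t x), set_update_add,
        PySem.Set.update_cons]

-- A's accumulator law: the loop's rv threads as a union, and the final seen ignores rv.
theorem egA_acc (groups : PySem.Dict String (List String)) (items seen rv : List String) :
    (egA groups items seen rv).val =
      (PySem.Set.update rv (egA groups items seen PySem.Set.empty).val.1,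
       (egA groups items seen PySem.Set.empty).val.2) := by
  match items with
  | [] => rw [egA, egA]; rfl
  | item :: rest =>
    rw [egA, egA]
    by_cases h1 : PySem.Str.startswith item "@" = true
    · rw [if_pos h1, if_pos h1]
      show (egA groups rest seen (PySem.Set.add rv item)).val =
        (PySem.Set.update rv (egA groups rest seen (PySem.Set.add PySem.Set.empty item)).val.1,
         (egA groups rest seen (PySem.Set.add PySem.Set.empty item)).val.2)
      rw [egA_acc groups rest seen (PySem.Set.add rv item),
          egA_acc groups rest seen (PySem.Set.add PySem.Set.empty item)]
      have he : PySem.Set.add (PySem.Set.empty (α := String)) item = [item] := rfl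
      rw [he]
      refine Prod.ext ?_ rfl
      show PySem.Set.update (PySem.Set.add rv item) _ =
        PySem.Set.update rv (PySem.Set.update [item] _)
      rw [set_update_assoc, PySem.Set.update_cons, set_update_nil]
    · rw [if_neg h1, if_neg h1]
      by_cases hg : groups.contains item = true
      · rw [dif_pos hg, dif_pos hg]
        by_cases hs : PySem.Set.contains seen item = true
        · rw [dif_pos hs, dif_pos hs]
          exact egA_acc groups rest seen rv
        · rw [dif_neg hs, dif_neg hs]
          have hnd : ((egA groups (groups.getD item []) (PySem.Set.add seen item)
              PySem.Set.empty).val.1).Nodup :=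
            (egA groups (groups.getD item []) (PySem.Set.add seen item)
              PySem.Set.empty).property.2 List.nodup_nil
          show (egA groups rest (egA groups (groups.getD item []) (PySem.Set.add seen item) PySem.Set.empty).val.2
              (PySem.Set.union rv (egA groups (groups.getD item []) (PySem.Set.add seen item) PySem.Set.empty).val.1)).val =
            (PySem.Set.update rv
              (egA groups rest (egA groups (groups.getD item []) (PySem.Set.add seen item) PySem.Set.empty).val.2
                (PySem.Set.union PySem.Set.empty (egA groups (groups.getD item []) (PySem.Set.add seen item) PySem.Set.empty).val.1)).val.1,
             (egA groups rest (egA groups (groups.getD item []) (PySem.Set.add seen item) PySem.Set.empty).val.2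
                (PySem.Set.union PySem.Set.empty (egA groups (groups.getD item []) (PySem.Set.add seen item) PySem.Set.empty).val.1)).val.2)
          rw [egA_acc groups rest _ (PySem.Set.union rv _),
              egA_acc groups rest _ (PySem.Set.union PySem.Set.empty _)]
          refine Prod.ext ?_ rfl
          show PySem.Set.update (PySem.Set.update rv _) _ =
            PySem.Set.update rv (PySem.Set.update (PySem.Set.update PySem.Set.empty _) _)
          have he : PySem.Set.update PySem.Set.empty
              (egA groups (groups.getD item []) (PySem.Set.add seen item) PySem.Set.empty).val.1 =
              (egA groups (groups.getD item []) (PySem.Set.add seen item) PySem.Set.empty).val.1 := by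
            show PySem.Set.update [] _ = _
            rw [PySem.Set.update_nil_left]
            exact PySem.Set.ofList_eq_self_of_nodup _ hnd
          rw [he, set_update_assoc]
      · rw [dif_neg hg, dif_neg hg]
        exact egA_acc groups rest seen rv
  termination_by (pvMu groups seen, items.length)
  decreasing_by
  all_goals first
    | exact Prod.Lex.right _ (by simp only [List.length_cons]; omega)
    | · refine Prod.Lex.left _ _ ?_
        have hs' : item ∉ seen := fun hm => hs ((PySem.Set.contains_iff _ _).mpr hm)
        first
          | exact pvMu_lt groups seen _ item hg hs'
              (fun x hx => (PySem.Set.mem_add _ _ _).mpr (Or.inl hx))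
              ((PySem.Set.mem_add _ _ _).mpr (Or.inr rfl))
          | exact pvMu_lt groups seen _ item hg hs'
              (fun x hx => (egA groups (groups.getD item []) (PySem.Set.add seen item)
                  PySem.Set.empty).property.1 x ((PySem.Set.mem_add _ _ _).mpr (Or.inl hx)))
              ((egA groups (groups.getD item []) (PySem.Set.add seen item)
                  PySem.Set.empty).property.1 item ((PySem.Set.mem_add _ _ _).mpr (Or.inr rfl)))

-- The bridge: running B's stack loop on `items ++ stack` first performs A's loop on `items`.
theorem egB_bridge (groups : PySem.Dict String (List String)) (items stack seen rv : List String) :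
    egB groups (items ++ stack) seen rv =
      egB groups stack (egA groups items seen rv).val.2 (egA groups items seen rv).val.1 := by
  match items with
  | [] => rw [egA]; rfl
  | item :: rest =>
    rw [egA, List.cons_append, egB]
    by_cases h1 : PySem.Str.startswith item "@" = true
    · rw [if_pos h1, if_pos h1]
      show egB groups (rest ++ stack) seen (PySem.Set.add rv item) =
        egB groups stack (egA groups rest seen (PySem.Set.add rv item)).val.2
          (egA groups rest seen (PySem.Set.add rv item)).val.1
      exact egB_bridge groups rest stack seen (PySem.Set.add rv item)
    · rw [if_neg h1, if_neg h1]
      by_cases hg : groups.contains item = true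
      · rw [dif_pos hg]
        by_cases hs : PySem.Set.contains seen item = true
        · have hc : ¬ ((groups.contains item && !(PySem.Set.contains seen item)) = true) := by
            rw [hg, hs]; simp
          rw [dif_neg hc, dif_pos hs]
          exact egB_bridge groups rest stack seen rv
        · have hs0 : PySem.Set.contains seen item = false := by
            cases h2 : PySem.Set.contains seen item
            · rfl
            · exact absurd h2 hs
          have hc : (groups.contains item && !(PySem.Set.contains seen item)) = true := by
            rw [hg, hs0]; rfl
          rw [dif_pos hc, dif_neg hs]
          show egB groups (groups.getD item [] ++ (rest ++ stack)) (PySem.Set.add seen item) rv =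
            egB groups stack
              (egA groups rest (egA groups (groups.getD item []) (PySem.Set.add seen item) PySem.Set.empty).val.2
                (PySem.Set.union rv (egA groups (groups.getD item []) (PySem.Set.add seen item) PySem.Set.empty).val.1)).val.2
              (egA groups rest (egA groups (groups.getD item []) (PySem.Set.add seen item) PySem.Set.empty).val.2
                (PySem.Set.union rv (egA groups (groups.getD item []) (PySem.Set.add seen item) PySem.Set.empty).val.1)).val.1
          rw [egB_bridge groups (groups.getD item []) (rest ++ stack) (PySem.Set.add seen item) rv]
          rw [egB_bridge groups rest stack
              (egA groups (groups.getD item []) (PySem.Set.add seen item) rv).val.2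
              (egA groups (groups.getD item []) (PySem.Set.add seen item) rv).val.1]
          rw [egA_acc groups (groups.getD item []) (PySem.Set.add seen item) rv]
          rfl
      · have hg0 : groups.contains item = false := by
          cases h2 : groups.contains item
          · rfl
          · exact absurd h2 hg
        have hc : ¬ ((groups.contains item && !(PySem.Set.contains seen item)) = true) := by
          rw [hg0]; simp
        rw [dif_neg hc, dif_neg hg]
        exact egB_bridge groups rest stack seen rv
  termination_by (pvMu groups seen, items.length)
  decreasing_by
  all_goals first
    | exact Prod.Lex.right _ (by simp only [List.length_cons]; omega)
    | · refine Prod.Lex.left _ _ ?_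
        have hs' : item ∉ seen := fun hm => hs ((PySem.Set.contains_iff _ _).mpr hm)
        first
          | exact pvMu_lt groups seen _ item hg hs'
              (fun x hx => (PySem.Set.mem_add _ _ _).mpr (Or.inl hx))
              ((PySem.Set.mem_add _ _ _).mpr (Or.inr rfl))
          | exact pvMu_lt groups seen _ item hg hs'
              (fun x hx => (egA groups (groups.getD item []) (PySem.Set.add seen item) rv).property.1 x
                ((PySem.Set.mem_add _ _ _).mpr (Or.inl hx)))
              ((egA groups (groups.getD item []) (PySem.Set.add seen item) rv).property.1 item
                ((PySem.Set.mem_add _ _ _).mpr (Or.inr rfl)))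

-- Running B's loop on the whole items list is A's loop followed by the empty-stack base case.
theorem top_eq (G : PySem.Dict String (List String)) (items S : List String) :
    (egA G items S PySem.Set.empty).val.1 = egB G items S PySem.Set.empty := by
  have h := egB_bridge G items [] S PySem.Set.empty
  rw [List.append_nil] at h
  rw [h, egB]

-- ===== VERDICT (by name: the statement is the Claim_ definition above) =====
theorem expand_groups_spec : Claim_equal_expand_groups := by
  intro config items seen _
  unfold Spec_expand_groups expand_groups expand_groups_alt
  cases seen with
  | none =>
    show (egA (PySem.Dict.mk ((PySem.Dict.mk config).getD "groups" [])) items PySem.Set.empty PySem.Set.empty).val.1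
      = egB (PySem.Dict.mk ((PySem.Dict.mk config).getD "groups" [])) items PySem.Set.empty PySem.Set.empty
    exact top_eq _ items _
  | some s =>
    show (egA (PySem.Dict.mk ((PySem.Dict.mk config).getD "groups" [])) items s PySem.Set.empty).val.1
      = egB (PySem.Dict.mk ((PySem.Dict.mk config).getD "groups" [])) items s PySem.Set.empty
    exact top_eq _ items _
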